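-- pv_equiv track=rewrite | github.com/iasmimtx/Questoes-p1 | Questoes/prova2.py | ofuscador
-- ===== SOURCE A (Python) =====
-- def ofuscador(linha):
--     string = ''
--     linha_dividida = linha.split()
--     palavra_atual = 0
--     for i in range(len(linha)):
--         codigo = ord(linha[i])
--         letra = ''
--         if codigo >= 65 and codigo <= 90:
--             letra = chr(codigo + 32)
--         elif codigo >= 97 and codigo <= 122:
--             letra = chr(codigo - 32)
--         else:
--             letra = linha[i]
--         if letra == 'A' or letra == 'a':
--             string += '4'
--         elif letra == 'B' or letra == 'b':
--             string += '8'
--         elif letra == 'E' or letra == 'e':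
--             string += '3'
--         elif letra == 'G' or letra == 'g':
--             string += '6'
--         elif letra == 'I' or letra =='i':
--             string += '1'
--         elif letra == 'L' or letra == 'l':
--             string += '7'
--         elif letra == 'S' or letra == 's':
--             string += '5'
--         elif letra == 'O' or letra == 'o':
--             string += '0'
--         elif letra == ' ':
--             for j in range(len(linha_dividida[palavra_atual])):
--                 string += '*'
--             palavra_atual += 1
--         else:
--             string += letra
--     return string
-- ===== SOURCE B (Python) =====
-- def ofuscador(linha):
--     # two-phase rewrite: a table-driven per-character transform (leet digits via a
--     # dict on the lowercased char, otherwise case swap), then a separate pass that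
--     # expands each space to '*' times the length of the corresponding split() word.
--     leet = {'a': '4', 'b': '8', 'e': '3', 'g': '6', 'i': '1', 'l': '7', 's': '5', 'o': '0'}
--     mid = ''.join(leet.get(c.lower(), c.swapcase()) for c in linha)
--     lens = [len(w) for w in linha.split()]
--     pieces = []
--     k = 0
--     for c in mid:
--         if c == ' ':
--             pieces.append('*' * lens[k])
--             k += 1
--         else:
--             pieces.append(c)
--     return ''.join(pieces)
-- ===== Notes on version B (the rewrite author's own statement) =====
-- stated objective: idiomatic
-- what changed: Replaces A's single interleaved loop with a ten-way if/elif chain (manual ord/chr case flip, then leet tests on both cases, then space handling) by a two-phase rewrite: a table-driven per-character transform (leet dict looked up on the lowercased character, falling back to str.swapcase) producing an intermediate string, followed by a separate pass that expands each space to a run of asterisks whose length is the precomputed length of the corresponding split() word.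
import Mathlib
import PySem

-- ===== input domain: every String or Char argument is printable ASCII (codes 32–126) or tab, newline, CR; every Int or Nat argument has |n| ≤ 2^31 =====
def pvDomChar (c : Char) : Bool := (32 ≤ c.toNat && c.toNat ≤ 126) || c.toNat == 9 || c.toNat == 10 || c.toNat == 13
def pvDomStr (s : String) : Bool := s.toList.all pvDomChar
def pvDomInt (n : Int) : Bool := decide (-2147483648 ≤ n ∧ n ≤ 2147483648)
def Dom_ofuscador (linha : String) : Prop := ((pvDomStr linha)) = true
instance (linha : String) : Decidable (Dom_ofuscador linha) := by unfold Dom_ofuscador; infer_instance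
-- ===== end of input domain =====

-- B replaces A's single interleaved if/elif loop by a table-driven per-character
-- transform (leet dict on the lowercased char, else case swap) followed by a
-- separate space-expansion pass over the intermediate string (objective: idiomatic).

-- ===== PORT A =====
-- per-character case flip on ord ranges 65–90 / 97–122 (hand port of chr/ord arithmetic; exact)
def pvSwapA (c : Char) : Char :=
  let codigo := c.toNat
  if 65 ≤ codigo ∧ codigo ≤ 90 then Char.ofNat (codigo + 32)
  else if 97 ≤ codigo ∧ codigo ≤ 122 then Char.ofNat (codigo - 32)
  else c

-- one iteration of A's loop; the state is (string-so-far, palavra_atual),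
-- none = an IndexError has occurred (linha_dividida[palavra_atual] out of range)
def ofuscadorStep (linhaDividida : List String) (st : Option (List Char × Nat)) (c : Char) :
    Option (List Char × Nat) :=
  match st with
  | none => none
  | some (acc, k) =>
    let letra := pvSwapA c
    if letra = 'A' ∨ letra = 'a' then some (acc ++ ['4'], k)
    else if letra = 'B' ∨ letra = 'b' then some (acc ++ ['8'], k)
    else if letra = 'E' ∨ letra = 'e' then some (acc ++ ['3'], k)
    else if letra = 'G' ∨ letra = 'g' then some (acc ++ ['6'], k)
    else if letra = 'I' ∨ letra = 'i' then some (acc ++ ['1'], k)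
    else if letra = 'L' ∨ letra = 'l' then some (acc ++ ['7'], k)
    else if letra = 'S' ∨ letra = 's' then some (acc ++ ['5'], k)
    else if letra = 'O' ∨ letra = 'o' then some (acc ++ ['0'], k)
    else if letra = ' ' then
      match PySem.List.pyGet? linhaDividida (k : Int) with
      | none => none  -- Python raises IndexError here; excluded by Pre_ofuscador
      | some w => some (acc ++ List.replicate w.length '*', k + 1)
    else some (acc ++ [letra], k)

def ofuscador (linha : String) : String :=
  let linhaDividida := PySem.Str.split₀ linha
  match linha.toList.foldl (ofuscadorStep linhaDividida) (some ([], 0)) with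
  | some st => String.ofList st.1
  | none => ""  -- unreachable under Pre_ofuscador (Python raises IndexError)

-- ===== PORT B =====
def pvLeet : PySem.Dict Char Char :=
  PySem.Dict.ofList [('a', '4'), ('b', '8'), ('e', '3'), ('g', '6'),
                     ('i', '1'), ('l', '7'), ('s', '5'), ('o', '0')]

-- hand port of str.swapcase on one character; exact on the ASCII domain
def pvSwapcase (c : Char) : Char :=
  if PySem.Chars.isupper c then PySem.Chars.lowerChar c
  else if PySem.Chars.islower c then PySem.Chars.upperChar c
  else c

-- phase 1 table transform: leet.get(c.lower(), c.swapcase())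
def pvLeetChar (c : Char) : Char := pvLeet.getD (PySem.Chars.lowerChar c) (pvSwapcase c)

-- phase 2: expand each space to '*' * lens[k]; the k-out-of-range IndexError
-- is excluded by Pre_ofuscador, so the default 0 is never taken under the claim
def pvExpand (lens : List Nat) (st : List Char × Nat) (c : Char) : List Char × Nat :=
  if c = ' ' then (st.1 ++ List.replicate (lens.getD st.2 0) '*', st.2 + 1)
  else (st.1 ++ [c], st.2)

def ofuscador_alt (linha : String) : String :=
  let mid := linha.toList.map pvLeetChar
  let lens := (PySem.Str.split₀ linha).map (fun w => w.length)
  String.ofList (mid.foldl (pvExpand lens) ([], 0)).1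

-- ===== PRECONDITION & SPEC =====
-- Pre_ excludes exactly the inputs with more spaces than split() words, on which
-- Python A (and also B) raises IndexError at linha_dividida[palavra_atual].
def Pre_ofuscador (linha : String) : Prop :=
  linha.toList.count ' ' ≤ (PySem.Str.split₀ linha).length
instance (linha : String) : Decidable (Pre_ofuscador linha) := by
  unfold Pre_ofuscador; infer_instance

def pvWitness_ofuscador : String := "Ola Mundo!"

def Spec_ofuscador (linha : String) (out : String) : Prop := out = ofuscador_alt linha
instance (linha : String) (out : String) : Decidable (Spec_ofuscador linha out) := by
  unfold Spec_ofuscador; infer_instance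

-- ===== CLAIM (what is proved, stated in full; the proofs are below) =====
def Claim_equal_ofuscador : Prop :=
  ∀ (linha : String), Dom_ofuscador linha → Pre_ofuscador linha →
    Spec_ofuscador linha (ofuscador linha)

-- ===== LEMMAS AND PROOFS =====

-- character-level agreement: on every non-space domain character, A's branch
-- chain appends exactly B's table character, and that character is not a space
theorem pv_nonspace_char (c : Char) (hdom : pvDomChar c = true) (hc : c ≠ ' ') :
    (∀ (ws : List String) (acc : List Char) (k : Nat),
        ofuscadorStep ws (some (acc, k)) c = some (acc ++ [pvLeetChar c], k))
    ∧ pvLeetChar c ≠ ' ' := by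
  have hval : c = Char.ofNat c.toNat := (Char.ofNat_toNat c).symm
  simp only [pvDomChar, Bool.or_eq_true, Bool.and_eq_true, decide_eq_true_eq,
    beq_iff_eq] at hdom
  obtain ((⟨h1, h2⟩ | h9) | h10) | h13 := hdom
  · obtain ⟨n, hn⟩ : ∃ n, c.toNat = n := ⟨_, rfl⟩
    rw [hn] at h1 h2
    have hcn : c = Char.ofNat n := by rw [hval, hn]
    subst hcn
    interval_cases n <;>
      first
        | exact ⟨fun ws acc k => rfl, by decide⟩
        | exact absurd rfl hc
  · rw [show c = Char.ofNat 9 from by rw [hval, h9]]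
    exact ⟨fun ws acc k => rfl, by decide⟩
  · rw [show c = Char.ofNat 10 from by rw [hval, h10]]
    exact ⟨fun ws acc k => rfl, by decide⟩
  · rw [show c = Char.ofNat 13 from by rw [hval, h13]]
    exact ⟨fun ws acc k => rfl, by decide⟩

theorem pv_getD_map_length (ws : List String) (k : Nat) :
    (ws.map (fun w => w.length)).getD k 0 = (ws.getD k "").length := by
  induction ws generalizing k with
  | nil => simp
  | cons w ws ih => cases k with
    | zero => simp
    | succ k => simpa using ih k

-- the two loops agree as long as the space counter stays within the word list
theorem pv_loop_eq (ws : List String) :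
    ∀ (l : List Char) (acc : List Char) (k : Nat),
      (∀ c ∈ l, pvDomChar c = true) → k + l.count ' ' ≤ ws.length →
      l.foldl (ofuscadorStep ws) (some (acc, k)) =
        some (l.foldl (fun st c => pvExpand (ws.map (fun w => w.length)) st (pvLeetChar c))
          (acc, k)) := by
  intro l
  induction l with
  | nil => intro acc k _ _; rfl
  | cons c l ih =>
    intro acc k hd hb
    have hdl : ∀ x ∈ l, pvDomChar x = true := fun x hx => hd x (List.mem_cons_of_mem _ hx)
    by_cases hc : c = ' '
    · subst hc
      have hcount : (' ' :: l).count ' ' = l.count ' ' + 1 := by simp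
      have hk : k < ws.length := by omega
      have hget : PySem.List.pyGet? ws (k : Int) = some (ws.getD k "") := by
        rw [PySem.List.pyGet?_natCast, List.getElem?_eq_getElem hk,
          List.getD_eq_getElem ws _ hk]
      simp only [List.foldl_cons]
      have hstepA : ofuscadorStep ws (some (acc, k)) ' '
          = some (acc ++ List.replicate (ws.getD k "").length '*', k + 1) := by
        simp [ofuscadorStep, pvSwapA, hget]
      have hstepB : pvExpand (ws.map (fun w => w.length)) (acc, k) (pvLeetChar ' ')
          = (acc ++ List.replicate (ws.getD k "").length '*', k + 1) := by
        have h1 : pvLeetChar ' ' = ' ' := rfl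
        simp only [pvExpand, h1, if_pos]
        rw [pv_getD_map_length]
      rw [hstepA, hstepB]
      exact ih _ _ hdl (by omega)
    · obtain ⟨hA, hB⟩ := pv_nonspace_char c (hd c (List.mem_cons_self)) hc
      simp only [List.foldl_cons]
      rw [hA ws acc k]
      have hstepB : pvExpand (ws.map (fun w => w.length)) (acc, k) (pvLeetChar c)
          = (acc ++ [pvLeetChar c], k) := by
        simp [pvExpand, hB]
      rw [hstepB]
      have : (c :: l).count ' ' = l.count ' ' := by
        simp [hc]
      exact ih _ _ hdl (by omega)

-- ===== VERDICT (by name: the statement is the Claim_ definition above) =====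
theorem ofuscador_spec : Claim_equal_ofuscador := by
  intro linha hdom hpre
  unfold Spec_ofuscador ofuscador ofuscador_alt
  have hd : ∀ c ∈ linha.toList, pvDomChar c = true := by
    simpa [Dom_ofuscador, pvDomStr, List.all_eq_true] using hdom
  have hp : (0 : Nat) + linha.toList.count ' ' ≤ (PySem.Str.split₀ linha).length := by
    simpa [Pre_ofuscador] using hpre
  simp only [List.foldl_map]
  rw [pv_loop_eq (PySem.Str.split₀ linha) linha.toList [] 0 hd hp]
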